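-- pv_equiv track=rewrite | github.com/smartnodes-ecosystem/smartnodes | tensorlink/ml/graphing.py | find_best_worker
-- ===== SOURCE A (Python) =====
-- def find_best_worker(worker_info, module_memory):
--     suitable_workers = {
--         key: info for key, info in worker_info.items() if info["memory"] >= module_memory
--     }
--
--     if not suitable_workers:
--         return None
--
--     best_worker = min(suitable_workers.items(), key=lambda x: x[1]["memory"])
--     return best_worker
-- ===== SOURCE B (Python) =====
-- def find_best_worker(worker_info, module_memory):
--     best = None
--     for key, info in worker_info.items():
--         mem = info["memory"]
--         if mem >= module_memory:
--             if best is None or mem < best[1]["memory"]: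
--                 best = (key, info)
--     return best
-- ===== Notes on version B (the rewrite author's own statement) =====
-- stated objective: simpler
-- what changed: Replaces the two-phase filtered-dict-then-min with a single pass keeping a running best (strict < preserves min's first-minimal tie-break); Pre_ additionally excludes association lists with duplicate keys, which a Python dict cannot represent, and workers missing a 'memory' entry, on which A raises KeyError.
import Mathlib
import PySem

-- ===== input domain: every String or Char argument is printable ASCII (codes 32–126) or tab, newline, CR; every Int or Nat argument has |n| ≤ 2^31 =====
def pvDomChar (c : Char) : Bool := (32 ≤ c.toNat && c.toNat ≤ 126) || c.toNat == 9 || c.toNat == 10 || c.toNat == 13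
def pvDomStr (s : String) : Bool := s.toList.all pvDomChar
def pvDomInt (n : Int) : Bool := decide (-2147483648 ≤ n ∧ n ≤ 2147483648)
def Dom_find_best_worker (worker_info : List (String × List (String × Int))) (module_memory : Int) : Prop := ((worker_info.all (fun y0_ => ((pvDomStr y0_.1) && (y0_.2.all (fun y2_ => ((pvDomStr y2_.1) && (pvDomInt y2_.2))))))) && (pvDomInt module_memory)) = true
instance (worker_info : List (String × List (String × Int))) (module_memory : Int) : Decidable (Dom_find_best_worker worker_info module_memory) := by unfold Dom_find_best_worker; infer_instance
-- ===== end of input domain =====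

-- B fuses A's two phases (build filtered dict, then min over its items) into one pass with a
-- running best; Pre_ excludes duplicate-key association lists (unrepresentable as a Python dict)
-- and workers without a "memory" entry (A raises KeyError there).


-- info["memory"]: first-match lookup in the inner dict; Pre_ guarantees the key is present
-- (Python raises KeyError otherwise), so the 0 default is never reached on admitted inputs.
def pvMem (info : List (String × Int)) : Int := (PySem.Dict.mk info).getD "memory" 0

-- ===== PORT A =====
def find_best_worker (worker_info : List (String × List (String × Int))) (module_memory : Int) : Option (String × (List (String × Int))) :=
  -- dict comprehension: {key: info for key, info in worker_info.items() if info["memory"] >= module_memory}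
  let suitable_workers : PySem.Dict String (List (String × Int)) :=
    worker_info.foldl (fun d p => if pvMem p.2 ≥ module_memory then d.insert p.1 p.2 else d) PySem.Dict.empty
  if suitable_workers.items = [] then none
  else PySem.List.min? suitable_workers.items (fun x => pvMem x.2)

-- ===== PORT B =====
def find_best_worker_alt (worker_info : List (String × List (String × Int))) (module_memory : Int) : Option (String × (List (String × Int))) :=
  worker_info.foldl
    (fun best p =>
      let mem := pvMem p.2
      if mem ≥ module_memory then
        match best with
        | none => some p
        | some b => if mem < pvMem b.2 then some p else some b
      else best)
    none

-- ===== PRECONDITION & SPEC =====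
-- Pre_ excludes association lists with duplicate keys (outer or inner), which a Python dict
-- cannot represent, and workers whose inner dict has no "memory" key, on which A raises KeyError.
def Pre_find_best_worker (worker_info : List (String × List (String × Int))) (module_memory : Int) : Prop :=
  (worker_info.map Prod.fst).Nodup ∧
  ∀ p ∈ worker_info, (p.2.map Prod.fst).Nodup ∧ "memory" ∈ p.2.map Prod.fst
instance (worker_info : List (String × List (String × Int))) (module_memory : Int) : Decidable (Pre_find_best_worker worker_info module_memory) := by unfold Pre_find_best_worker; infer_instance
def pvWitness_find_best_worker : (List (String × List (String × Int))) × Int :=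
  ([("a", [("memory", 5)]), ("b", [("memory", 3)])], 3)

def Spec_find_best_worker (worker_info : List (String × List (String × Int))) (module_memory : Int) (out : Option (String × (List (String × Int)))) : Prop := out = find_best_worker_alt worker_info module_memory
instance (worker_info : List (String × List (String × Int))) (module_memory : Int) (out : Option (String × (List (String × Int)))) : Decidable (Spec_find_best_worker worker_info module_memory out) := by unfold Spec_find_best_worker; infer_instance

-- ===== CLAIM (what is proved, stated in full; the proofs are below) =====
def Claim_equal_find_best_worker : Prop := ∀ (worker_info : List (String × List (String × Int))) (module_memory : Int), Dom_find_best_worker worker_info module_memory → Pre_find_best_worker worker_info module_memory → Spec_find_best_worker worker_info module_memory (find_best_worker worker_info module_memory)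

-- ===== LEMMAS AND PROOFS =====

-- A's fold-with-filter-condition equals a plain insert fold over the filtered list.
lemma foldl_if_insert (wi : List (String × List (String × Int))) (mm : Int)
    (d : PySem.Dict String (List (String × Int))) :
    wi.foldl (fun d p => if pvMem p.2 ≥ mm then d.insert p.1 p.2 else d) d
      = (wi.filter (fun p => pvMem p.2 ≥ mm)).foldl (fun d p => d.insert p.1 p.2) d := by
  induction wi generalizing d with
  | nil => rfl
  | cons h t ih =>
      simp only [List.foldl_cons, List.filter_cons]
      by_cases hc : pvMem h.2 ≥ mm
      · simp [hc, ih]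
      · simp [hc, ih]

-- B's fused fold equals min? over the filtered list (min? is exactly the running-best fold).
lemma foldl_fused (wi : List (String × List (String × Int))) (mm : Int)
    (acc : Option (String × List (String × Int))) :
    wi.foldl
      (fun best p =>
        let mem := pvMem p.2
        if mem ≥ mm then
          match best with
          | none => some p
          | some b => if mem < pvMem b.2 then some p else some b
        else best) acc
      = (wi.filter (fun p => pvMem p.2 ≥ mm)).foldl
          (fun acc x =>
            match acc with
            | none => some x
            | some m => if pvMem x.2 < pvMem m.2 then some x else some m) acc := by
  induction wi generalizing acc with
  | nil => rfl
  | cons h t ih =>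
      simp only [List.foldl_cons, List.filter_cons]
      by_cases hc : pvMem h.2 ≥ mm
      · simp [hc, ih]
      · simp [hc, ih]

-- ===== VERDICT (by name: the statement is the Claim_ definition above) =====
theorem find_best_worker_spec : Claim_equal_find_best_worker := by
  intro wi mm _hdom hpre
  show find_best_worker wi mm = find_best_worker_alt wi mm
  unfold find_best_worker find_best_worker_alt
  rw [foldl_if_insert, foldl_fused]
  set l := wi.filter (fun p => pvMem p.2 ≥ mm) with hl
  have hitems :
      (l.foldl (fun d p => d.insert p.1 p.2) PySem.Dict.empty).items = l := by
    have hnd : (l.map Prod.fst).Nodup := by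
      exact (List.filter_sublist.map Prod.fst).nodup hpre.1
    have := PySem.Dict.items_foldl_insert_fresh (l := l) (k := Prod.fst) (v := Prod.snd)
      (d := PySem.Dict.empty) (by intro a _; rfl) hnd
    simpa using this
  simp only [hitems]
  by_cases hnil : l = []
  · rw [if_pos hnil, hnil]; rfl
  · rw [if_neg hnil]
    unfold PySem.List.min?
    congr 1
    funext acc x
    cases acc <;> rfl
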